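-- pv_equiv track=rewrite | github.com/sefzig/PDL | packages/py/pdl/pdl.py | trim_block_edges
-- ===== SOURCE A (Python) =====
-- from typing import Any, Dict, List, Optional, Tuple
--
-- def trim_block_edges(block: List[str]) -> List[str]:
--     if not block:
--         return block
--     lead = 0
--     while lead < len(block) and block[lead].strip() == "":
--         lead += 1
--     kept_lead = 1 if lead > 0 else 0
--
--     trail = 0
--     for t in range(len(block) - 1, -1, -1):
--         if block[t].strip() == "":
--             trail += 1
--         else:
--             break
--     kept_trail = 1 if trail > 0 else 0
--
--     core = block[lead : len(block) - trail if trail > 0 else len(block)]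
--     out: List[str] = []
--     if kept_lead:
--         out.append("")
--     out.extend(core)
--     if kept_trail:
--         out.append("")
--     return out
-- ===== SOURCE B (Python) =====
-- def trim_block_edges(block):
--     if not block:
--         return block
--     non = [i for i, line in enumerate(block) if line.strip() != ""]
--     core = block[non[0] : non[-1] + 1] if non else []
--     head = [""] if block[0].strip() == "" else []
--     tail = [""] if block[-1].strip() == "" else []
--     return head + core + tail
-- ===== Notes on version B (the rewrite author's own statement) =====
-- stated objective: simpler
-- what changed: Replaces A's forward while-loop, backward break-loop and conditional slice bound with one comprehension collecting the non-blank indices and a single slice between the first and last of them.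
import Mathlib
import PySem

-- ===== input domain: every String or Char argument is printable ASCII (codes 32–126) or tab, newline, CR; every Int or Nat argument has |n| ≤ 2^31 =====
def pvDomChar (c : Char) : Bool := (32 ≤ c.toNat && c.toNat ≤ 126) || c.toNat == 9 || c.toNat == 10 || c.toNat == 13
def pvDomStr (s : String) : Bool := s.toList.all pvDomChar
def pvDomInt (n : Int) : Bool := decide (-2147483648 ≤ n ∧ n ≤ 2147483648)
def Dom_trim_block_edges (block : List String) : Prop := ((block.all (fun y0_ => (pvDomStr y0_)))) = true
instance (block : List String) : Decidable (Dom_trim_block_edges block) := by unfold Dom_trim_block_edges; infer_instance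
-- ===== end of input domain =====

-- B replaces A's forward while-loop, backward break-loop and conditional slice bound by one
-- non-blank-index comprehension and a single slice between its first and last entry (simpler; same O(n) cost).

def pvBlank (s : String) : Bool := PySem.Str.strip s == ""

-- ===== PORT A =====
-- while lead < len(block) and block[lead].strip() == "": lead += 1
def pvLeadA (block : List String) (lead : Nat) : Nat :=
  if lead < block.length && pvBlank (block.getD lead "") then pvLeadA block (lead + 1) else lead
termination_by block.length - lead
decreasing_by
  rename_i h
  simp at h
  omega

-- for t in range(len(block)-1, -1, -1): if block[t].strip() == "": trail += 1 else: break
def pvTrailA (block : List String) : List Int → Nat → Nat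
  | [], trail => trail
  | t :: rest, trail =>
    if pvBlank (PySem.List.pyGetD block t "") then pvTrailA block rest (trail + 1) else trail

def trim_block_edges (block : List String) : List String :=
  if block = [] then block
  else
    let lead := pvLeadA block 0
    let kept_lead : Nat := if lead > 0 then 1 else 0
    let trail := pvTrailA block (PySem.List.pyRange ((block.length : Int) - 1) (-1) (-1)) 0
    let kept_trail : Nat := if trail > 0 then 1 else 0
    let core := PySem.List.slice block (some (lead : Int))
      (some (if trail > 0 then ((block.length : Int) - (trail : Int)) else (block.length : Int)))
    (if kept_lead = 1 then [""] else []) ++ core ++ (if kept_trail = 1 then [""] else [])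

-- ===== PORT B =====
-- non = [i for i, line in enumerate(block) if line.strip() != ""]
def pvNonB (block : List String) : List Int :=
  ((PySem.List.enumerate block 0).filter (fun p => !(pvBlank p.2))).map (·.1)

def trim_block_edges_alt (block : List String) : List String :=
  if block = [] then block
  else
    let core :=
      match pvNonB block with
      | [] => ([] : List String)
      | i :: rest => PySem.List.slice block (some i) (some ((i :: rest).getLast (List.cons_ne_nil _ _) + 1))
    let head := if pvBlank (block.headD "") then [""] else []
    let tail := if pvBlank (block.getLastD "") then [""] else []
    head ++ core ++ tail

-- ===== PRECONDITION & SPEC =====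
def Spec_trim_block_edges (block : List String) (out : List String) : Prop := out = trim_block_edges_alt block
instance (block : List String) (out : List String) : Decidable (Spec_trim_block_edges block out) := by unfold Spec_trim_block_edges; infer_instance

-- ===== CLAIM (what is proved, stated in full; the proofs are below) =====
def Claim_equal_trim_block_edges : Prop := ∀ (block : List String), Dom_trim_block_edges block → Spec_trim_block_edges block (trim_block_edges block)

-- ===== LEMMAS AND PROOFS =====

-- A's leading-blank while loop counts the blank prefix.
theorem pvLeadA_eq (xs : List String) (lead : Nat) (h : lead ≤ xs.length) :
    pvLeadA xs lead = lead + ((xs.drop lead).takeWhile pvBlank).length := by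
  rw [pvLeadA]
  by_cases hlt : lead < xs.length
  · have hdrop := List.drop_eq_getElem_cons hlt
    have hget : xs.getD lead "" = xs[lead] := List.getD_eq_getElem xs "" hlt
    by_cases hb : pvBlank xs[lead] = true
    · rw [if_pos (by simp [hlt, hb])]
      rw [pvLeadA_eq xs (lead + 1) hlt, hdrop, List.takeWhile_cons, if_pos hb]
      simp
      omega
    · rw [if_neg (by simp [hlt, hb])]
      rw [hdrop, List.takeWhile_cons, if_neg hb]
      simp
  · have he : lead = xs.length := le_antisymm h (Nat.not_lt.mp hlt)
    rw [if_neg (by simp [hlt])]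
    simp [he]
termination_by xs.length - lead

-- A's backward break loop counts the blank suffix of the first k lines.
theorem pvTrailA_eq (xs : List String) :
    ∀ (k : Nat), k ≤ xs.length → ∀ trail,
      pvTrailA xs (PySem.List.pyRange ((k : Int) - 1) (-1) (-1)) trail
        = trail + ((xs.take k).reverse.takeWhile pvBlank).length := by
  intro k
  induction k with
  | zero => intro _ trail; simp [pvTrailA]
  | succ k ih =>
    intro hk trail
    have hklt : k < xs.length := hk
    have hcast : ((k + 1 : Nat) : Int) - 1 = (k : Int) := by push_cast; ring
    rw [hcast, PySem.List.pyRange_neg_one_cons (by omega : (-1:Int) < (k:Int))]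
    have hget : PySem.List.pyGetD xs (k : Int) "" = xs[k] := by
      rw [PySem.List.pyGetD_natCast, List.getD_eq_getElem xs "" hklt]
    have htake : (xs.take (k + 1)).reverse = xs[k] :: (xs.take k).reverse := by
      rw [List.take_add_one, List.getElem?_eq_getElem hklt]
      simp
    simp only [pvTrailA, hget]
    by_cases hb : pvBlank xs[k] = true
    · rw [if_pos hb, ih (le_of_lt hklt) (trail + 1), htake, List.takeWhile_cons, if_pos hb]
      simp
      omega
    · rw [if_neg hb, htake, List.takeWhile_cons, if_neg hb]
      simp

-- general-start version of B's index comprehension, for the induction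
def pvNon (xs : List String) (s : Int) : List Int :=
  ((PySem.List.enumerate xs s).filter (fun p => !(pvBlank p.2))).map (·.1)

theorem pvNonB_eq (xs : List String) : pvNonB xs = pvNon xs 0 := rfl

theorem pvNon_cons (x : String) (xs : List String) (s : Int) :
    pvNon (x :: xs) s = if pvBlank x then pvNon xs (s + 1) else s :: pvNon xs (s + 1) := by
  by_cases hb : pvBlank x = true <;> simp [pvNon, PySem.List.enumerate_cons, hb]

theorem pvNon_eq_nil_iff (xs : List String) : ∀ s, (pvNon xs s = [] ↔ xs.all pvBlank = true) := by
  induction xs with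
  | nil => intro s; simp [pvNon, PySem.List.enumerate_nil]
  | cons x xs ih =>
    intro s
    rw [pvNon_cons]
    by_cases hb : pvBlank x = true <;> simp [hb, ih]

theorem pvNon_head (xs : List String) : ∀ s, xs.all pvBlank ≠ true →
    (pvNon xs s).head? = some (s + ((xs.takeWhile pvBlank).length : Int)) := by
  induction xs with
  | nil => intro s h; simp at h
  | cons x xs ih =>
    intro s h
    rw [pvNon_cons]
    by_cases hb : pvBlank x = true
    · have h' : xs.all pvBlank ≠ true := by simp [hb] at h; simpa using h
      rw [if_pos hb, ih (s + 1) h', List.takeWhile_cons, if_pos hb]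
      simp only [Option.some.injEq, List.length_cons]
      push_cast
      ring
    · rw [if_neg hb, List.takeWhile_cons, if_neg hb]
      simp

theorem pvNon_getLast? (xs : List String) : ∀ s, xs.all pvBlank ≠ true →
    (pvNon xs s).getLast? = some (s + (xs.length : Int) - 1 - ((xs.reverse.takeWhile pvBlank).length : Int)) := by
  induction xs with
  | nil => intro s h; simp at h
  | cons x xs ih =>
    intro s h
    by_cases hall : xs.all pvBlank = true
    · have hx : ¬ pvBlank x = true := by
        intro hx; exact h (by simp [hx, hall])
      have hnil : pvNon xs (s + 1) = [] := (pvNon_eq_nil_iff xs (s + 1)).mpr hall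
      rw [pvNon_cons, if_neg hx, hnil]
      have hfull : xs.reverse.takeWhile pvBlank = xs.reverse := by
        rw [List.takeWhile_eq_self_iff]
        intro y hy
        exact (List.all_eq_true.mp hall) y (List.mem_reverse.mp hy)
      have hlen : ((x :: xs).reverse.takeWhile pvBlank).length = xs.length := by
        rw [List.reverse_cons, List.takeWhile_append, if_pos (by rw [hfull])]
        simp [hx]
      rw [hlen]
      simp only [List.getLast?_singleton, Option.some.injEq, List.length_cons]
      push_cast
      ring
    · have hlenne : (xs.reverse.takeWhile pvBlank).length ≠ xs.reverse.length := by
        intro hEq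
        have : xs.reverse.takeWhile pvBlank = xs.reverse :=
          (List.takeWhile_prefix pvBlank).eq_of_length hEq
        rw [List.takeWhile_eq_self_iff] at this
        exact hall (List.all_eq_true.mpr (fun y hy => this y (List.mem_reverse.mpr hy)))
      have hT : (x :: xs).reverse.takeWhile pvBlank = xs.reverse.takeWhile pvBlank := by
        rw [List.reverse_cons, List.takeWhile_append, if_neg hlenne]
      have hlast := ih (s + 1) hall
      rw [pvNon_cons]
      by_cases hb : pvBlank x = true
      · rw [if_pos hb, hlast, hT]
        simp only [Option.some.injEq, List.length_cons]
        push_cast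
        ring
      · rw [if_neg hb, List.getLast?_cons, hlast, hT]
        simp only [Option.getD_some, Option.some.injEq, List.length_cons]
        push_cast
        ring

-- ===== VERDICT (by name: the statement is the Claim_ definition above) =====
theorem trim_block_edges_spec : Claim_equal_trim_block_edges := by
  intro block _
  unfold Spec_trim_block_edges
  by_cases hnil : block = []
  · subst hnil; rfl
  · obtain ⟨x, xs, rfl⟩ := List.exists_cons_of_ne_nil hnil
    set b := x :: xs with hb
    set n := b.length with hn
    set L := (b.takeWhile pvBlank).length with hL
    set T := (b.reverse.takeWhile pvBlank).length with hT
    have hLle : L ≤ n := by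
      simpa using (List.takeWhile_prefix (l := b) pvBlank).length_le
    have hTle : T ≤ n := by
      have := (List.takeWhile_prefix (l := b.reverse) pvBlank).length_le
      simpa using this
    have hlead : pvLeadA b 0 = L := by simpa using pvLeadA_eq b 0 (Nat.zero_le _)
    have htrail : pvTrailA b (PySem.List.pyRange ((n : Int) - 1) (-1) (-1)) 0 = T := by
      have h0 := pvTrailA_eq b b.length le_rfl 0
      simpa [hn, hT, List.take_length] using h0
    have hhead : (pvBlank x = true) ↔ 0 < L := by
      by_cases hbx : pvBlank x = true <;> simp [hL, hb, hbx]
    -- last element of b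
    have hrevne : b.reverse ≠ [] := by simp [hb]
    obtain ⟨y, ys, hy⟩ := List.exists_cons_of_ne_nil hrevne
    have hlastd : b.getLastD "" = y := by
      have : b = ys.reverse ++ [y] := by
        have := congrArg List.reverse hy
        simpa using this
      rw [this, List.getLastD_concat]
    have htail : (pvBlank y = true) ↔ 0 < T := by
      by_cases hby : pvBlank y = true <;> simp [hT, hy, hby]
    -- the common normal form
    have hcoreA : PySem.List.slice b (some ((L : Nat) : Int))
        (some (if 0 < T then ((n : Int) - (T : Int)) else (n : Int))) = (b.drop L).take (n - T - L) := by
      by_cases hTpos : 0 < T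
      · rw [if_pos hTpos]
        have hcast : ((n : Int) - (T : Int)) = ((n - T : Nat) : Int) := by omega
        rw [hcast, PySem.List.slice_natCast]
      · rw [if_neg hTpos]
        have hT0 : T = 0 := by omega
        have hcast : (n : Int) = ((n - T : Nat) : Int) := by omega
        rw [hcast, PySem.List.slice_natCast]
    have hA : trim_block_edges b
        = (if 0 < L then [""] else []) ++ (b.drop L).take (n - T - L) ++ (if 0 < T then [""] else []) := by
      rw [trim_block_edges, if_neg hnil]
      simp only [hlead, htrail, ← hn]
      rw [hcoreA]
      by_cases hLpos : 0 < L <;> by_cases hTpos : 0 < T <;>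
        simp [hLpos, hTpos]
    have hB : trim_block_edges_alt b
        = (if 0 < L then [""] else []) ++ (b.drop L).take (n - T - L) ++ (if 0 < T then [""] else []) := by
      rw [trim_block_edges_alt, if_neg hnil]
      have hheadD : b.headD "" = x := by simp [hb]
      by_cases hall : b.all pvBlank = true
      · -- every line blank: the comprehension is empty, core is empty on both sides
        have hnon : pvNonB b = [] := by rw [pvNonB_eq, pvNon_eq_nil_iff]; exact hall
        have hLn : L = n := by
          rw [hL, hn]
          have : b.takeWhile pvBlank = b :=
            List.takeWhile_eq_self_iff.mpr (fun z hz => (List.all_eq_true.mp hall) z hz)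
          rw [this]
        have hTn : T = n := by
          rw [hT, hn]
          have : b.reverse.takeWhile pvBlank = b.reverse :=
            List.takeWhile_eq_self_iff.mpr
              (fun z hz => (List.all_eq_true.mp hall) z (List.mem_reverse.mp hz))
          rw [this, List.length_reverse]
        have hnpos : 0 < n := by simp [hn, hb]
        have hbx : pvBlank x = true := (List.all_eq_true.mp hall) x (by simp [hb])
        have hby : pvBlank y = true :=
          (List.all_eq_true.mp hall) y (List.mem_reverse.mp (by rw [hy]; simp))
        rw [hnon]
        simp only [hheadD, hlastd, hbx, hby]
        have : (b.drop L).take (n - T - L) = [] := by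
          rw [hLn]
          simp [hn]
        rw [this]
        simp [hLn, hTn, hnpos]
      · -- some non-blank line: the comprehension is i :: rest with i = L, last = n - 1 - T
        have hne : pvNonB b ≠ [] := by
          rw [pvNonB_eq, Ne, pvNon_eq_nil_iff]; exact hall
        obtain ⟨i, rest, hcons⟩ := List.exists_cons_of_ne_nil hne
        have hhd : i = (L : Int) := by
          have h1 := pvNon_head b 0 hall
          rw [← pvNonB_eq, hcons] at h1
          simp at h1
          omega
        subst hhd
        have hlast : ((L : Int) :: rest).getLast (List.cons_ne_nil _ _) = (n : Int) - 1 - (T : Int) := by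
          have h1 := pvNon_getLast? b 0 hall
          rw [← pvNonB_eq, hcons, List.getLast?_eq_some_getLast (List.cons_ne_nil _ _)] at h1
          have h2 := Option.some.inj h1
          rw [h2, hT, hn]
          ring
        rw [hcons]
        simp only [hlast, hheadD, hlastd]
        have hcast : ((n : Int) - 1 - (T : Int)) + 1 = ((n - T : Nat) : Int) := by omega
        rw [hcast, PySem.List.slice_natCast]
        simp only [hhead, htail]
    rw [hA, hB]
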